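-- pv_equiv track=rewrite | github.com/Nyuku/CPMP-AI | containeryard/StackedYard.py | gvalue
-- ===== SOURCE A (Python) =====
-- def gvalue(stack):
--     if len(stack)==0:
--         return 100
--     else:
--         for pos in range(len(stack)-1, -1, -1):
--             if stack[pos] > 0:
--                 return stack[pos]
--         return 0
-- ===== SOURCE B (Python) =====
-- def gvalue(stack):
--     if len(stack) == 0:
--         return 100
--     last = 0
--     for x in stack:
--         if x > 0:
--             last = x
--     return last
-- ===== Notes on version B (the rewrite author's own statement) =====
-- stated objective: simpler
-- what changed: Replaces the backward indexed scan with early return by a single forward traversal keeping a 'last positive seen' accumulator; no indexing and no early exit.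
import Mathlib
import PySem

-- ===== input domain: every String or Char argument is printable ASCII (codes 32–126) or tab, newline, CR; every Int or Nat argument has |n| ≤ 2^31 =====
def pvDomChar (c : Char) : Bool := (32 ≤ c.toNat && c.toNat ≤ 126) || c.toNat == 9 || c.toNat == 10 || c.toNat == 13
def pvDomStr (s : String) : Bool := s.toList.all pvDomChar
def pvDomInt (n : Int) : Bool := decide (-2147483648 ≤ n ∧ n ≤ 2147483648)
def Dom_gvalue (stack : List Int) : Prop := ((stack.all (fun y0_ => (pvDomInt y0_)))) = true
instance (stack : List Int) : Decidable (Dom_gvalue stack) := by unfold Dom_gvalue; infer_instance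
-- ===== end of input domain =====

-- B replaces A's backward indexed scan with early return by a forward pass keeping a
-- 'last positive seen' accumulator (objective: simpler; same asymptotic cost).

-- ===== PORT A =====
-- A's for-loop over range(len(stack)-1, -1, -1) with an early return on the first
-- positive element; indices produced by the loop are always in range, so stack[pos]
-- is ported as pyGetD with default 0.
def gvalueLoopA (stack : List Int) : List Int → Int
  | [] => 0
  | pos :: rest =>
    if PySem.List.pyGetD stack pos 0 > 0 then PySem.List.pyGetD stack pos 0
    else gvalueLoopA stack rest

def gvalue (stack : List Int) : Int :=
  if stack.length == 0 then 100
  else gvalueLoopA stack (PySem.List.pyRange ((stack.length : Int) - 1) (-1) (-1))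

-- ===== PORT B =====
def gvalue_alt (stack : List Int) : Int :=
  if stack = [] then 100
  else stack.foldl (fun last x => if x > 0 then x else last) 0

-- ===== PRECONDITION & SPEC =====
def Spec_gvalue (stack : List Int) (out : Int) : Prop := out = gvalue_alt stack
instance (stack : List Int) (out : Int) : Decidable (Spec_gvalue stack out) := by unfold Spec_gvalue; infer_instance

-- ===== CLAIM (what is proved, stated in full; the proofs are below) =====
def Claim_equal_gvalue : Prop := ∀ (stack : List Int), Dom_gvalue stack → Spec_gvalue stack (gvalue stack)

-- ===== LEMMAS AND PROOFS =====

-- B's forward accumulator equals the first positive of the reversed list (default = acc).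
theorem foldl_last_pos (xs : List Int) (a : Int) :
    xs.foldl (fun last x => if x > 0 then x else last) a
      = (xs.reverse.find? (fun v => decide (v > 0))).getD a := by
  induction xs generalizing a with
  | nil => simp
  | cons x xs ih =>
    simp only [List.foldl_cons, List.reverse_cons, List.find?_append]
    rw [ih]
    cases h : xs.reverse.find? (fun v => decide (v > 0)) with
    | some v => simp
    | none => by_cases hx : x > 0 <;> simp [hx]

-- A's backward index loop down from k equals the first positive of (take (k+1)).reverse.
theorem loopA_eq_find (stack : List Int) (k : Nat) (hk : k < stack.length) :
    gvalueLoopA stack (PySem.List.pyRange (k : Int) (-1) (-1))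
      = ((stack.take (k + 1)).reverse.find? (fun v => decide (v > 0))).getD 0 := by
  induction k with
  | zero =>
    rw [PySem.List.pyRange_neg_one_cons (by norm_num)]
    rw [PySem.List.pyRange_neg_one_eq_nil (by norm_num)]
    match stack, hk with
    | x :: rest, _ =>
      simp [gvalueLoopA, PySem.List.pyGetD]
      by_cases hx : x > 0 <;> simp [hx]
  | succ k ih =>
    have hk' : k < stack.length := Nat.lt_of_succ_lt hk
    rw [PySem.List.pyRange_neg_one_cons (by push_cast; omega)]
    have hcast : ((k : Int) + 1) - 1 = (k : Int) := by ring
    have hstep : gvalueLoopA stack ((((k : Nat) + 1 : Nat) : Int) :: PySem.List.pyRange ((((k : Nat) + 1 : Nat) : Int) - 1) (-1) (-1))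
        = if PySem.List.pyGetD stack (((k : Nat) + 1 : Nat) : Int) 0 > 0
          then PySem.List.pyGetD stack (((k : Nat) + 1 : Nat) : Int) 0
          else gvalueLoopA stack (PySem.List.pyRange ((((k : Nat) + 1 : Nat) : Int) - 1) (-1) (-1)) := rfl
    push_cast at hstep ⊢
    rw [hstep, hcast, ih hk']
    have hget : PySem.List.pyGetD stack ((k : Int) + 1) 0 = stack[k + 1] := by
      have : ((k : Int) + 1) = ((k + 1 : Nat) : Int) := by push_cast; ring
      rw [this, PySem.List.pyGetD_natCast]
      simp [List.getD, hk]
    have htake : stack.take (k + 1 + 1) = stack.take (k + 1) ++ [stack[k + 1]] :=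
      List.take_succ_eq_append_getElem hk
    rw [hget, htake]
    simp only [List.reverse_append, List.reverse_singleton, List.singleton_append, List.find?_cons]
    by_cases hx : stack[k + 1] > 0 <;> simp [hx]

-- ===== VERDICT (by name: the statement is the Claim_ definition above) =====
theorem gvalue_spec : Claim_equal_gvalue := by
  intro stack _
  unfold Spec_gvalue gvalue gvalue_alt
  cases stack with
  | nil => simp
  | cons x xs =>
    have hne : (x :: xs : List Int) ≠ [] := by simp
    have hlen : (x :: xs).length ≠ 0 := by simp
    simp only [hne, List.length_cons, Nat.succ_ne_zero, beq_iff_eq, if_false]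
    have hc : ((xs.length + 1 : Nat) : Int) - 1 = ((xs.length : Nat) : Int) := by push_cast; ring
    rw [hc, loopA_eq_find (x :: xs) xs.length (by simp)]
    have ht : List.take (xs.length + 1) (x :: xs) = x :: xs := by
      simp [List.take_of_length_le]
    rw [ht, foldl_last_pos]
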